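-- pv_equiv track=rewrite | github.com/DylanScottCarroll/WordEmbeddings | download_corpus.py | iterate_sections
-- ===== SOURCE A (Python) =====
-- def iterate_sections(start_point):
--     i_start, j_start = start_point or ('a' , 'a')
--     i_start, j_start = ord(i_start), ord(j_start)
--
--     end = ord('z')+1
--
--     for i in range(i_start, end):
--         for j in range(j_start, end):
--             yield chr(i), chr(j), (((i-ord('a'))*26) + (j-ord('a')) + 1)
--
--         j_start = ord('a')
-- ===== SOURCE B (Python) =====
-- def iterate_sections(start_point):
--     i_start, j_start = start_point or ('a', 'a')
--     a, z = ord('a'), ord('z')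
--     i0, j0 = ord(i_start), ord(j_start)
--     if i0 <= z:
--         # the (possibly partial) first row
--         for j in range(j0, z + 1):
--             yield chr(i0), chr(j), (i0 - a) * 26 + (j - a) + 1
--     # all remaining full rows, driven by one linear index
--     for k in range((i0 - a + 1) * 26, 26 * 26):
--         q, r = divmod(k, 26)
--         yield chr(a + q), chr(a + r), k + 1
-- ===== Notes on version B (the rewrite author's own statement) =====
-- stated objective: alternative
-- what changed: Replaces the two nested loops with the j_start reset by yielding the (possibly partial) first row directly and driving all remaining full rows with a single linear index k, recovering row/column via divmod(k, 26).
import Mathlib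
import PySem

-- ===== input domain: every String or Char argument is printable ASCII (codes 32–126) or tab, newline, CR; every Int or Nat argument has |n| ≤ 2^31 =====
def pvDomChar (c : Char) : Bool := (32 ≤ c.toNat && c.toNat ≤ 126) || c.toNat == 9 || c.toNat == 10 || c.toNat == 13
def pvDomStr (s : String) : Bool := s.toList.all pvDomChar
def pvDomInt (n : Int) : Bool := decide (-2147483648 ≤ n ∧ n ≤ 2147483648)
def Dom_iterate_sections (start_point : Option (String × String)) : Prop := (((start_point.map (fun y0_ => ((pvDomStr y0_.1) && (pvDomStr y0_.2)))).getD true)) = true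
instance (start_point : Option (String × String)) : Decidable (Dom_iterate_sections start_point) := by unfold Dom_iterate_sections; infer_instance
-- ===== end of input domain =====

-- B replaces the nested row/column loops (with the j_start reset) by one partial first row
-- plus a single linear index k with divmod — a different decomposition of the same sequence.


-- shared character helpers (exact for the single-character ASCII strings Pre_ admits)
-- ord(s): Python raises TypeError unless s is a single character; that case is outside Pre_
def pvOrd (s : String) : Int :=
  match s.toList with
  | [c] => (c.toNat : Int)
  | _ => 0
-- chr(n): exact for 0 ≤ n < 0xD800 (all codes arising here lie in 33..126)
def pvChr (n : Int) : String := String.ofList [Char.ofNat n.toNat]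

-- ===== PORT A =====
def iterate_sections (start_point : Option (String × String)) : List (String × String × Int) :=
  let p := start_point.getD ("a", "a")
  let i_start : Int := pvOrd p.1
  let j_start : Int := pvOrd p.2
  -- end = ord('z')+1 = 123; state = (yielded so far, current j_start; reset to 97 after each row)
  ((PySem.List.pyRange i_start 123 1).foldl
    (fun (st : List (String × String × Int) × Int) i =>
      (st.1 ++ (PySem.List.pyRange st.2 123 1).map
        (fun j => (pvChr i, pvChr j, (i - 97) * 26 + (j - 97) + 1)), 97))
    ([], j_start)).1

-- ===== PORT B =====
def iterate_sections_alt (start_point : Option (String × String)) : List (String × String × Int) :=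
  let p := start_point.getD ("a", "a")
  let i0 : Int := pvOrd p.1
  let j0 : Int := pvOrd p.2
  (if i0 ≤ 122 then
    (PySem.List.pyRange j0 123 1).map
      (fun j => (pvChr i0, pvChr j, (i0 - 97) * 26 + (j - 97) + 1))
   else []) ++
  (PySem.List.pyRange ((i0 - 97 + 1) * 26) 676 1).map
    (fun k => (pvChr (97 + PySem.Int.floordiv k 26), pvChr (97 + PySem.Int.mod k 26), k + 1))

-- ===== PRECONDITION & SPEC =====
-- Pre_ excludes start points whose components are not single-character strings: Python's ord raises TypeError there (in A and in B alike).
def Pre_iterate_sections (start_point : Option (String × String)) : Prop :=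
  ((start_point.map (fun p => p.1.length == 1 && p.2.length == 1)).getD true) = true
instance (start_point : Option (String × String)) : Decidable (Pre_iterate_sections start_point) := by unfold Pre_iterate_sections; infer_instance
def pvWitness_iterate_sections : (Option (String × String)) := some ("x", "c")

def Spec_iterate_sections (start_point : Option (String × String)) (out : List (String × String × Int)) : Prop := out = iterate_sections_alt start_point
instance (start_point : Option (String × String)) (out : List (String × String × Int)) : Decidable (Spec_iterate_sections start_point out) := by unfold Spec_iterate_sections; infer_instance

-- ===== CLAIM (what is proved, stated in full; the proofs are below) =====
def Claim_equal_iterate_sections : Prop := ∀ (start_point : Option (String × String)), Dom_iterate_sections start_point → Pre_iterate_sections start_point → Spec_iterate_sections start_point (iterate_sections start_point)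

-- ===== LEMMAS AND PROOFS =====

-- the per-pair value and a full/partial row, as both ports build them
def pvPair (i j : Int) : String × String × Int := (pvChr i, pvChr j, (i - 97) * 26 + (j - 97) + 1)
def pvRow (j0 i : Int) : List (String × String × Int) := (PySem.List.pyRange j0 123 1).map (pvPair i)
def pvG (k : Int) : String × String × Int :=
  (pvChr (97 + PySem.Int.floordiv k 26), pvChr (97 + PySem.Int.mod k 26), k + 1)

-- A's fold once the j_start reset has happened: every later row is full
theorem pvFold_flush (l : List Int) (acc : List (String × String × Int)) :
    (l.foldl (fun (st : List (String × String × Int) × Int) i =>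
      (st.1 ++ (PySem.List.pyRange st.2 123 1).map (pvPair i), 97)) (acc, 97)).1
    = acc ++ l.flatMap (pvRow 97) := by
  induction l generalizing acc with
  | nil => simp
  | cons i is ih => simp [List.foldl_cons, ih, pvRow, List.append_assoc]

-- a pair inside a full row equals the linear-index form
theorem pvPair_eq_g (i t : Int) (h0 : 0 ≤ t) (h1 : t < 26) :
    pvPair i (97 + t) = pvG ((i - 97) * 26 + t) := by
  have hd : PySem.Int.floordiv ((i - 97) * 26 + t) 26 = i - 97 := by
    rw [PySem.Int.floordiv_eq_ediv_of_pos (by norm_num)]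
    omega
  have hm : PySem.Int.mod ((i - 97) * 26 + t) 26 = t := by
    rw [PySem.Int.mod_eq_emod_of_pos (by norm_num)]
    omega
  unfold pvPair pvG
  rw [hd, hm, show (97 : Int) + (i - 97) = i from by ring,
      show (97 : Int) + t - 97 = t from by ring]

-- n consecutive full rows starting at row i = one linear k-range
theorem pvRows_lin (n : Nat) (i : Int) :
    ((List.range n).map (fun t : Nat => i + (t : Int))).flatMap (pvRow 97)
    = (PySem.List.pyRange ((i - 97) * 26) ((i - 97) * 26 + n * 26) 1).map pvG := by
  induction n with
  | zero =>
    rw [show ((i - 97) * 26 + ((0 : Nat) : Int) * 26) = (i - 97) * 26 from by push_cast; ring,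
        PySem.List.pyRange_one_eq_nil le_rfl]
    simp
  | succ n ih =>
    rw [List.range_succ, List.map_append, List.flatMap_append, ih]
    push_cast
    rw [PySem.List.pyRange_one_append ((i - 97) * 26) ((i - 97) * 26 + n * 26)
          ((i - 97) * 26 + (n + 1) * 26) (by omega) (by omega),
        List.map_append]
    congr 1
    -- the new last row
    simp only [List.map_cons, List.map_nil, List.flatMap_cons, List.flatMap_nil, List.append_nil]
    rw [pvRow, PySem.List.pyRange_one 97 123, PySem.List.pyRange_one]
    have h26 : ((123 : Int) - 97).toNat = 26 := by decide
    have h26' : (((i - 97) * 26 + (n + 1) * 26) - ((i - 97) * 26 + n * 26)).toNat = 26 := by omega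
    rw [h26, h26', List.map_map, List.map_map]
    refine List.map_congr_left ?_
    intro t ht
    have ht26 : (t : Int) < 26 := by exact_mod_cast List.mem_range.mp ht
    have h := pvPair_eq_g (i + (n : Int)) (t : Int) (by positivity) ht26
    simp only [Function.comp]
    calc pvPair (i + (n : Int)) (97 + (t : Int))
        = pvG ((i + (n : Int) - 97) * 26 + (t : Int)) := h
      _ = pvG ((i - 97) * 26 + (n : Int) * 26 + (t : Int)) := by
          rw [show ((i + (n : Int) - 97) * 26 + (t : Int))
              = ((i - 97) * 26 + (n : Int) * 26 + (t : Int)) from by ring]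

-- the whole sequence, for arbitrary integer start codes
theorem pvCore (i0 j0 : Int) :
    ((PySem.List.pyRange i0 123 1).foldl
      (fun (st : List (String × String × Int) × Int) i =>
        (st.1 ++ (PySem.List.pyRange st.2 123 1).map (pvPair i), 97)) ([], j0)).1
    = (if i0 ≤ 122 then (PySem.List.pyRange j0 123 1).map (pvPair i0) else []) ++
      (PySem.List.pyRange ((i0 - 97 + 1) * 26) 676 1).map pvG := by
  by_cases h : i0 ≤ 122
  · rw [PySem.List.pyRange_one_cons (by omega : i0 < 123), List.foldl_cons]
    simp only [if_pos h, List.nil_append]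
    rw [pvFold_flush, PySem.List.pyRange_one (i0 + 1) 123]
    have hn : ((123 : Int) - (i0 + 1)).toNat = (122 - i0).toNat := by omega
    rw [hn, pvRows_lin ((122 - i0).toNat) (i0 + 1)]
    have e1 : ((i0 + 1) - 97) * 26 = (i0 - 97 + 1) * 26 := by ring
    have e2 : (i0 - 97 + 1) * 26 + (((122 - i0).toNat : Int)) * 26 = 676 := by omega
    rw [e1, e2]
  · rw [PySem.List.pyRange_one_eq_nil (by omega : (123 : Int) ≤ i0),
        PySem.List.pyRange_one_eq_nil (by omega : (676 : Int) ≤ (i0 - 97 + 1) * 26)]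
    simp [h]

-- ===== VERDICT (by name: the statement is the Claim_ definition above) =====
theorem iterate_sections_spec : Claim_equal_iterate_sections := by
  intro sp _ _
  unfold Spec_iterate_sections iterate_sections iterate_sections_alt
  exact pvCore (pvOrd (sp.getD ("a","a")).1) (pvOrd (sp.getD ("a","a")).2)
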